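-- pv_equiv track=rewrite | github.com/tokongs/TDT4110 | assignment_5/workdays.py | workdays_in_year
-- ===== SOURCE A (Python) =====
-- def is_leap_year(year):
--     if year % 400 == 0:
--         return True
--     elif year % 100 == 0:
--         return False
--     elif year % 4 == 0:
--         return True
--
-- def weekday_newyear(year):
--     day = 0
--     for x in range(1900, year):
--         if(is_leap_year(x)):
--            day += 2
--         else:
--             day += 1
--     return day % 7
--
-- def workdays_in_year(year):
--     days = 365
--     if(is_leap_year(year)):
--         days = 366
--
--     start = weekday_newyear(year)
--     days += start
--     workdays = 0
--     for x in range(start, days):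
--         if(x % 7 < 5):
--             workdays += 1
--     return workdays
-- ===== SOURCE B (Python) =====
-- def workdays_in_year(year):
--     # O(1): closed-form leap count for the new-year weekday, arithmetic weekday-count formula.
--     def L(y):
--         return y // 4 - y // 100 + y // 400
--     leap = year % 4 == 0 and (year % 100 != 0 or year % 400 == 0)
--     days = 366 if leap else 365
--     if year <= 1900:
--         start = 0
--     else:
--         start = ((year - 1900) + L(year - 1) - L(1899)) % 7
--     def f(n):
--         return 5 * (n // 7) + min(n % 7, 5)
--     return f(start + days) - f(start)
-- ===== Notes on version B (the rewrite author's own statement) =====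
-- stated objective: faster
-- what changed: Replaced A's two loops (one over every year since the epoch to find new-year's weekday, one over every day of the year) by a closed-form Gregorian leap-year count from floor divisions and an arithmetic weekday-counting formula, making the whole function O(1).
import Mathlib
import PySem

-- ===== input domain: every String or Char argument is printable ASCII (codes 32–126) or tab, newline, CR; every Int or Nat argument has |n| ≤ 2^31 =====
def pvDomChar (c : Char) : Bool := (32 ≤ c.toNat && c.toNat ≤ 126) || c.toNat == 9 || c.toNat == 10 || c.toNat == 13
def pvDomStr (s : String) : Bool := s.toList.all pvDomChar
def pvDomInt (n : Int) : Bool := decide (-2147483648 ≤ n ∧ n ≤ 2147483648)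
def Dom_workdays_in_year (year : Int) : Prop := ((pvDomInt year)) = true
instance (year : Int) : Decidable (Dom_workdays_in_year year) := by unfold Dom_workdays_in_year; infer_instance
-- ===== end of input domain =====

-- B replaces A's two O(year) loops by a closed-form leap-year count and an
-- arithmetic weekday-count formula: O(1) instead of O(year).

-- ===== PORT A =====
-- Python's is_leap_year returns None on the fall-through branch; it is only
-- used as a condition, and None is falsy, so the port returns false there.
def is_leap_year (year : Int) : Bool :=
  if PySem.Int.mod year 400 = 0 then true
  else if PySem.Int.mod year 100 = 0 then false
  else if PySem.Int.mod year 4 = 0 then true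
  else false

def weekday_newyear (year : Int) : Int :=
  PySem.Int.mod ((PySem.List.pyRange 1900 year 1).foldl
    (fun day x => if is_leap_year x then day + 2 else day + 1) 0) 7

def workdays_in_year (year : Int) : Int :=
  let days : Int := if is_leap_year year then 366 else 365
  let start := weekday_newyear year
  let days := days + start
  (PySem.List.pyRange start days 1).foldl
    (fun workdays x => if PySem.Int.mod x 7 < 5 then workdays + 1 else workdays) 0

-- ===== PORT B =====
def pvL (y : Int) : Int :=
  PySem.Int.floordiv y 4 - PySem.Int.floordiv y 100 + PySem.Int.floordiv y 400

def pvF (n : Int) : Int :=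
  5 * PySem.Int.floordiv n 7 + min (PySem.Int.mod n 7) 5

def workdays_in_year_alt (year : Int) : Int :=
  let days : Int :=
    if PySem.Int.mod year 4 = 0 ∧ (¬ PySem.Int.mod year 100 = 0 ∨ PySem.Int.mod year 400 = 0)
    then 366 else 365
  let start : Int :=
    if year ≤ 1900 then 0
    else PySem.Int.mod ((year - 1900) + pvL (year - 1) - pvL 1899) 7
  pvF (start + days) - pvF start

-- ===== PRECONDITION & SPEC =====
def Spec_workdays_in_year (year : Int) (out : Int) : Prop := out = workdays_in_year_alt year
instance (year : Int) (out : Int) : Decidable (Spec_workdays_in_year year out) := by unfold Spec_workdays_in_year; infer_instance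

-- ===== CLAIM (what is proved, stated in full; the proofs are below) =====
def Claim_equal_workdays_in_year : Prop := ∀ (year : Int), Dom_workdays_in_year year → Spec_workdays_in_year year (workdays_in_year year)

-- ===== LEMMAS AND PROOFS =====

theorem leap_iff (y : Int) :
    is_leap_year y = true ↔
      (PySem.Int.mod y 4 = 0 ∧ (¬ PySem.Int.mod y 100 = 0 ∨ PySem.Int.mod y 400 = 0)) := by
  unfold is_leap_year
  simp only [PySem.Int.mod_eq_emod_of_pos (show (0:Int) < 400 by norm_num),
      PySem.Int.mod_eq_emod_of_pos (show (0:Int) < 100 by norm_num),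
      PySem.Int.mod_eq_emod_of_pos (show (0:Int) < 4 by norm_num)]
  split_ifs with h1 h2 h3 <;> simp <;> omega

theorem pvL_step (y : Int) :
    pvL y = pvL (y - 1) + (if is_leap_year y then (1 : Int) else 0) := by
  have hl := leap_iff y
  simp only [PySem.Int.mod_eq_emod_of_pos (show (0:Int) < 4 by norm_num),
    PySem.Int.mod_eq_emod_of_pos (show (0:Int) < 100 by norm_num),
    PySem.Int.mod_eq_emod_of_pos (show (0:Int) < 400 by norm_num)] at hl
  unfold pvL
  simp only [PySem.Int.floordiv_eq_ediv_of_pos (show (0:Int) < 4 by norm_num),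
    PySem.Int.floordiv_eq_ediv_of_pos (show (0:Int) < 100 by norm_num),
    PySem.Int.floordiv_eq_ediv_of_pos (show (0:Int) < 400 by norm_num)]
  by_cases h : is_leap_year y = true
  · rw [if_pos h]
    obtain ⟨h4, h2⟩ := hl.mp h
    rcases h2 with h2 | h2 <;> omega
  · rw [if_neg h]
    have hn : ¬ (y % 4 = 0 ∧ (¬ y % 100 = 0 ∨ y % 400 = 0)) := fun hc => h (hl.mpr hc)
    rw [not_and_or, not_or, not_not] at hn
    rcases hn with hn | ⟨hb, hc⟩ <;> omega

-- the accumulator of A's first loop, as a function of how many years past 1900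
theorem loopA_eq (n : Nat) :
    (PySem.List.pyRange 1900 (1900 + (n : Int)) 1).foldl
        (fun day x => if is_leap_year x then day + 2 else day + 1) 0
      = (n : Int) + pvL (1899 + n) - pvL 1899 := by
  induction n with
  | zero => simp
  | succ m ih =>
    have hsplit : PySem.List.pyRange 1900 (1900 + ((m+1 : Nat) : Int)) 1
        = PySem.List.pyRange 1900 (1900 + (m : Int)) 1 ++ [1900 + (m : Int)] := by
      push_cast
      rw [show (1900:Int) + ((m:Int) + 1) = (1900 + (m:Int)) + 1 from by ring]
      exact PySem.List.pyRange_one_succ_right (show (1900:Int) ≤ 1900 + (m:Int) by omega)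
    rw [hsplit, List.foldl_append, ih]
    have hstep := pvL_step (1900 + (m : Int))
    rw [show (1900 + (m:Int)) - 1 = 1899 + (m:Int) from by ring] at hstep
    push_cast
    rw [show (1899:Int) + ((m:Int) + 1) = 1900 + (m:Int) from by ring]
    simp only [List.foldl_cons, List.foldl_nil]
    by_cases h : is_leap_year (1900 + (m : Int)) = true <;> simp [h] at hstep ⊢ <;> omega

theorem start_eq (year : Int) :
    weekday_newyear year
      = (if year ≤ 1900 then (0:Int)
         else PySem.Int.mod ((year - 1900) + pvL (year - 1) - pvL 1899) 7) := by
  unfold weekday_newyear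
  by_cases h : year ≤ 1900
  · rw [if_pos h, PySem.List.pyRange_one_eq_nil h]
    simp
  · rw [if_neg h]
    obtain ⟨n, hn⟩ : ∃ n : Nat, year = 1900 + (n:Int) := ⟨(year - 1900).toNat, by omega⟩
    subst hn
    rw [loopA_eq]
    congr 1
    rw [show (1900:Int) + (n:Int) - 1 = 1899 + (n:Int) from by ring]
    ring

theorem start_bounds (year : Int) : 0 ≤ weekday_newyear year ∧ weekday_newyear year < 7 := by
  unfold weekday_newyear
  rw [PySem.Int.mod_eq_emod_of_pos (show (0:Int) < 7 by norm_num)]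
  exact ⟨Int.emod_nonneg _ (by norm_num), Int.emod_lt_of_pos _ (by norm_num)⟩

set_option maxRecDepth 4000 in
theorem count_eq (s d : Int) (hs0 : 0 ≤ s) (hs7 : s < 7) (hd : d = 365 ∨ d = 366) :
    (PySem.List.pyRange s (d + s) 1).foldl
        (fun workdays x => if PySem.Int.mod x 7 < 5 then workdays + 1 else workdays) 0
      = pvF (s + d) - pvF s := by
  interval_cases s <;> rcases hd with hd | hd <;> subst hd <;> decide

-- ===== VERDICT (by name: the statement is the Claim_ definition above) =====
theorem workdays_in_year_spec : Claim_equal_workdays_in_year := by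
  intro year _
  show workdays_in_year year = workdays_in_year_alt year
  unfold workdays_in_year workdays_in_year_alt
  have hdays : (if is_leap_year year then (366:Int) else 365)
      = (if PySem.Int.mod year 4 = 0 ∧ (¬ PySem.Int.mod year 100 = 0 ∨ PySem.Int.mod year 400 = 0)
         then (366:Int) else 365) := by
    by_cases h : is_leap_year year = true
    · rw [if_pos h, if_pos ((leap_iff year).mp h)]
    · rw [if_neg h, if_neg (fun hc => h ((leap_iff year).mpr hc))]
  rw [hdays, ← start_eq year]
  obtain ⟨h0, h7⟩ := start_bounds year
  have := count_eq (weekday_newyear year)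
    (if PySem.Int.mod year 4 = 0 ∧ (¬ PySem.Int.mod year 100 = 0 ∨ PySem.Int.mod year 400 = 0)
     then (366:Int) else 365) h0 h7 (by split_ifs <;> simp)
  rw [← this]
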